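-- pv_equiv track=rewrite | github.com/Dave11233/leetcode | nowcoder/HJ96.py | solve
-- ===== SOURCE A (Python) =====
-- def solve(s: str):
--     if not s:
--         return ""
--     ans = ""
--     i, j = 0, 0
--     length = len(s)
--     while i < length:
--         if s[i].isdigit():
--             ans += "*"
--             j = i + 1
--             while j < length and s[j].isdigit():
--                 j += 1
--             ans += s[i:j]
--             ans += "*"
--             i = j
--         else:
--             ans += s[i]
--             i += 1
--     return ans
-- ===== SOURCE B (Python) =====
-- def solve(s: str):
--     # One pass that groups consecutive characters by digit-ness, then joins
--     # the runs, starring the digit runs.  (No index arithmetic, no inner scan.)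
--     pieces = []
--     cur = ""
--     prev = None
--     for ch in s:
--         k = ch.isdigit()
--         if k != prev and cur:
--             pieces.append("*" + cur + "*" if prev else cur)
--             cur = ""
--         cur += ch
--         prev = k
--     if cur:
--         pieces.append("*" + cur + "*" if prev else cur)
--     return "".join(pieces)
-- ===== Notes on version B (the rewrite author's own statement) =====
-- stated objective: faster
-- what changed: Replaces A's index-based while-loop with an inner boundary-scanning while and repeated concatenation onto the growing answer string by a single for-pass that groups consecutive characters by digit-ness (a hand-rolled groupby) and joins the decorated runs at the end.
import Mathlib
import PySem

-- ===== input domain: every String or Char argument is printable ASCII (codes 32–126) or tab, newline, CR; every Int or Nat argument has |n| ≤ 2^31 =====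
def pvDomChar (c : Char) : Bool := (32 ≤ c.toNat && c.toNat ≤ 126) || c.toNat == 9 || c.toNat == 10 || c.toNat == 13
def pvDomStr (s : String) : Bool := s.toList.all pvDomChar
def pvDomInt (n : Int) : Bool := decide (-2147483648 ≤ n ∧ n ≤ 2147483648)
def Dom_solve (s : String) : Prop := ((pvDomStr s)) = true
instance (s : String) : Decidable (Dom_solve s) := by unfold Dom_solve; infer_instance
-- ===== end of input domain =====

-- B replaces A's index-based while-loop (with an inner digit-run boundary scan) by one
-- grouping for-pass over the characters, joining the runs at the end (measured faster).
-- On this ASCII domain, Python's str.isdigit() on a single character is Char.isDigit.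

-- ===== PORT A =====
-- inner while: 'while j < length and s[j].isdigit(): j += 1'
def solveInner (cs : List Char) (length j : Nat) : Nat :=
  if j < length ∧ (cs.getD j ' ').isDigit then solveInner cs length (j + 1) else j
termination_by length - j
decreasing_by omega

-- needed by solveOuter's termination proof, so it stays above the port
theorem solveInner_ge (cs : List Char) (length j : Nat) : j ≤ solveInner cs length j := by
  unfold solveInner
  split
  · exact le_trans (Nat.le_succ j) (solveInner_ge cs length (j + 1))
  · exact le_refl j
termination_by length - j
decreasing_by omega

-- outer while over index i; the slice 's[i:j]' is '(cs.drop i).take (j - i)' (exact here: 0 ≤ i ≤ j)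
def solveOuter (cs : List Char) (length i : Nat) (ans : List Char) : List Char :=
  if i < length then
    if (cs.getD i ' ').isDigit then
      let j := solveInner cs length (i + 1)
      solveOuter cs length j (ans ++ '*' :: ((cs.drop i).take (j - i) ++ ['*']))
    else
      solveOuter cs length (i + 1) (ans ++ [cs.getD i ' '])
  else ans
termination_by length - i
decreasing_by
  · have := solveInner_ge cs length (i + 1); omega
  · omega

def solve (s : String) : String :=
  if s.toList = [] then "" else String.mk (solveOuter s.toList s.toList.length 0 [])

-- ===== PORT B =====
-- '"*" + cur + "*" if prev else cur'  (prev is None or a bool; truthy means some true)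
def solveDeco (prev : Option Bool) (cur : List Char) : List Char :=
  if prev = some true then '*' :: cur ++ ['*'] else cur

-- loop body of B's single for-pass (state: pieces, cur, prev)
def solveStep (st : List (List Char) × List Char × Option Bool) (ch : Char) :
    List (List Char) × List Char × Option Bool :=
  let k := ch.isDigit
  if some k ≠ st.2.2 ∧ st.2.1 ≠ [] then (st.1 ++ [solveDeco st.2.2 st.2.1], [ch], some k)
  else (st.1, st.2.1 ++ [ch], some k)

def solve_alt (s : String) : String :=
  let st := s.toList.foldl solveStep ([], [], none)
  let pieces := if st.2.1 ≠ [] then st.1 ++ [solveDeco st.2.2 st.2.1] else st.1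
  String.mk pieces.flatten

-- ===== PRECONDITION & SPEC =====
def Spec_solve (s : String) (out : String) : Prop := out = solve_alt s
instance (s : String) (out : String) : Decidable (Spec_solve s out) := by unfold Spec_solve; infer_instance

-- ===== CLAIM (what is proved, stated in full; the proofs are below) =====
def Claim_equal_solve : Prop := ∀ (s : String), Dom_solve s → Spec_solve s (solve s)

-- ===== LEMMAS AND PROOFS =====

-- the common characterisation: the answer, run by run
def runSpec : List Char → List Char
  | [] => []
  | c :: rest =>
    if c.isDigit then
      '*' :: (c :: rest.takeWhile Char.isDigit) ++ '*' :: runSpec (rest.dropWhile Char.isDigit)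
    else c :: runSpec rest
termination_by cs => cs.length
decreasing_by
  · have := List.length_dropWhile_le Char.isDigit rest; simp; omega
  · simp

theorem take_length_takeWhile (p : Char → Bool) (l : List Char) :
    l.take (l.takeWhile p).length = l.takeWhile p := by
  induction l with
  | nil => rfl
  | cons c t ih =>
    by_cases h : p c
    · simp [h, ih]
    · simp [h]

theorem drop_length_takeWhile (p : Char → Bool) (l : List Char) :
    l.drop (l.takeWhile p).length = l.dropWhile p := by
  induction l with
  | nil => rfl
  | cons c t ih =>
    by_cases h : p c
    · simp [h, ih]
    · simp [h]

-- A-side: the inner while computes the end of the digit run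
theorem solveInner_eq (cs : List Char) (length j : Nat) (h : length = cs.length) :
    solveInner cs length j = j + ((cs.drop j).takeWhile Char.isDigit).length := by
  unfold solveInner
  split
  · rename_i hc
    have hj : j < cs.length := by omega
    have ih := solveInner_eq cs length (j + 1) h
    rw [ih, List.drop_eq_getElem_cons hj]
    rw [List.getD_eq_getElem cs ' ' hj] at hc
    rw [List.takeWhile_cons_of_pos hc.2]
    simp; omega
  · rename_i hc
    by_cases hj : j < cs.length
    · have hd : ¬ (cs.getD j ' ').isDigit := by
        intro hd; exact hc ⟨by omega, hd⟩
      rw [List.getD_eq_getElem cs ' ' hj] at hd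
      rw [List.drop_eq_getElem_cons hj]
      simp [hd]
    · rw [List.drop_eq_nil_of_le (by omega)]
      simp
termination_by length - j
decreasing_by omega

-- A-side: the outer while computes runSpec of the remaining suffix
theorem solveOuter_eq (cs : List Char) (length i : Nat) (ans : List Char)
    (h : length = cs.length) :
    solveOuter cs length i ans = ans ++ runSpec (cs.drop i) := by
  unfold solveOuter
  split
  · rename_i hi
    have hi' : i < cs.length := by omega
    have hdrop : cs.drop i = cs[i] :: cs.drop (i + 1) := List.drop_eq_getElem_cons hi'
    rw [List.getD_eq_getElem cs ' ' hi']
    split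
    · rename_i hd
      have hji := solveInner_ge cs length (i + 1)
      have hj : solveInner cs length (i + 1) = (i + 1) + ((cs.drop (i + 1)).takeWhile Char.isDigit).length :=
        solveInner_eq cs length (i + 1) h
      rw [solveOuter_eq cs length _ _ h]
      have hslice : (cs.drop i).take (solveInner cs length (i + 1) - i) =
          cs[i] :: (cs.drop (i + 1)).takeWhile Char.isDigit := by
        rw [hdrop, hj]
        have : i + 1 + ((cs.drop (i + 1)).takeWhile Char.isDigit).length - i =
            ((cs.drop (i + 1)).takeWhile Char.isDigit).length + 1 := by omega
        rw [this, List.take_succ_cons, take_length_takeWhile]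
      have hrest : cs.drop (solveInner cs length (i + 1)) =
          (cs.drop (i + 1)).dropWhile Char.isDigit := by
        have h2 := drop_length_takeWhile Char.isDigit (cs.drop (i + 1))
        rw [List.drop_drop] at h2
        rw [hj]; exact h2
      rw [hslice, hrest, hdrop]
      simp only [runSpec]
      simp [hd]
    · rename_i hd
      rw [solveOuter_eq cs length _ _ h, hdrop]
      simp only [runSpec]
      simp [hd]
  · rename_i hi
    rw [List.drop_eq_nil_of_le (by omega)]
    simp [runSpec]

termination_by length - i
decreasing_by
  · have := solveInner_ge cs length (i + 1); omega
  · omega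

-- B-side helpers
def finishB (st : List (List Char) × List Char × Option Bool) : List Char :=
  (if st.2.1 ≠ [] then st.1 ++ [solveDeco st.2.2 st.2.1] else st.1).flatten

def specFrom (b : Bool) (cur cs : List Char) : List Char :=
  solveDeco (some b) (cur ++ cs.takeWhile (fun c => c.isDigit == b)) ++
    runSpec (cs.dropWhile (fun c => c.isDigit == b))

theorem runSpec_nondigit (run t : List Char) (h : ∀ x ∈ run, x.isDigit = false) :
    runSpec (run ++ t) = run ++ runSpec t := by
  induction run with
  | nil => simp
  | cons c r ih =>
    have hc : c.isDigit = false := h c (by simp)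
    have ht := ih (fun x hx => h x (by simp [hx]))
    simp [runSpec, hc, ht]

-- one maximal run, peeled off the front
theorem runSpec_cons_group (c : Char) (rest : List Char) :
    runSpec (c :: rest) = specFrom c.isDigit [c] rest := by
  cases hb : c.isDigit
  · have hnd : ∀ x ∈ rest.takeWhile (fun x : Char => !x.isDigit), x.isDigit = false := by
      intro x hx
      simpa using List.mem_takeWhile_imp hx
    have hgrp := runSpec_nondigit (rest.takeWhile (fun x : Char => !x.isDigit))
      (rest.dropWhile (fun x : Char => !x.isDigit)) hnd
    simp [runSpec, hb, specFrom, solveDeco]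
    calc runSpec rest
        = runSpec (rest.takeWhile (fun x : Char => !x.isDigit) ++
            rest.dropWhile (fun x : Char => !x.isDigit)) := by
          rw [List.takeWhile_append_dropWhile]
      _ = _ := hgrp
  · simp [runSpec, hb, specFrom, solveDeco]

-- B-side: the fold, run with a nonempty current group, produces the grouped answer
theorem foldB (cs : List Char) : ∀ (pieces : List (List Char)) (cur : List Char) (b : Bool),
    cur ≠ [] →
    finishB (cs.foldl solveStep (pieces, cur, some b)) = pieces.flatten ++ specFrom b cur cs := by
  induction cs with
  | nil =>
    intro pieces cur b hcur
    simp [finishB, hcur, specFrom, runSpec]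
  | cons c rest ih =>
    intro pieces cur b hcur
    by_cases hk : c.isDigit = b
    · have hstep : solveStep (pieces, cur, some b) c = (pieces, cur ++ [c], some b) := by
        simp [solveStep, hk]
      rw [List.foldl_cons, hstep, ih pieces (cur ++ [c]) b (by simp)]
      have : specFrom b cur (c :: rest) = specFrom b (cur ++ [c]) rest := by
        simp [specFrom, hk]
      rw [this]
    · have hstep : solveStep (pieces, cur, some b) c =
          (pieces ++ [solveDeco (some b) cur], [c], some c.isDigit) := by
        simp [solveStep, hk, hcur]
      rw [List.foldl_cons, hstep, ih _ [c] c.isDigit (by simp)]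
      have hne : (c.isDigit == b) = false := by simp [hk]
      simp [specFrom, hne, runSpec_cons_group]
-- ===== VERDICT (by name: the statement is the Claim_ definition above) =====
theorem solve_spec : Claim_equal_solve := by
  intro s _
  unfold Spec_solve
  show solve s = solve_alt s
  cases hcs : s.toList with
  | nil =>
    simp [solve, solve_alt, hcs]
    rfl
  | cons c rest =>
    have hA : solve s = String.mk (runSpec (c :: rest)) := by
      rw [solve, if_neg (by simp [hcs]), solveOuter_eq _ _ 0 [] rfl]
      simp [hcs]
    have hstep : solveStep ([], [], none) c = ([], [c], some c.isDigit) := by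
      simp [solveStep]
    have hB : solve_alt s = String.mk (finishB (s.toList.foldl solveStep ([], [], none))) := by
      rfl
    rw [hA, hB, hcs, List.foldl_cons, hstep, foldB rest [] [c] c.isDigit (by simp)]
    rw [runSpec_cons_group]
    simp
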